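-- pv_equiv track=rewrite | github.com/yaghofgm/somePython | edubridge_algoritmo/calculate_loanOptions.py | detectar_subintervalos
-- ===== SOURCE A (Python) =====
-- def detectar_subintervalos(lista):
--     if not lista:
--         return []
--
--     subintervalos = []
--     inicio = lista[0]
--     fim = lista[0]
--
--     for valor in lista[1:]:
--         if valor == fim + 5000:
--             fim = valor
--         else:
--             subintervalos.append(f"[{inicio}, {fim}]")
--             inicio = fim = valor
--     subintervalos.append(f"[{inicio}, {fim}]")
--     return subintervalos
-- ===== SOURCE B (Python) =====
-- def detectar_subintervalos(lista):
--     n = len(lista)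
--     grupos = []
--     i = 0
--     while i < n:
--         k = lista[i] - 5000 * i
--         j = i + 1
--         while j < n and lista[j] - 5000 * j == k:
--             j += 1
--         grupos.append((lista[i], lista[j - 1]))
--         i = j
--     return [f"[{a}, {b}]" for a, b in grupos]
-- ===== Notes on version B (the rewrite author's own statement) =====
-- stated objective: alternative
-- what changed: B labels each element with the groupby key value-5000*index and scans maximal equal-key runs with two index pointers, collecting (first,last) endpoint pairs and formatting them in a second pass, instead of A's single fold carrying inicio/fim state and appending strings as it goes.
import Mathlib
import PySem

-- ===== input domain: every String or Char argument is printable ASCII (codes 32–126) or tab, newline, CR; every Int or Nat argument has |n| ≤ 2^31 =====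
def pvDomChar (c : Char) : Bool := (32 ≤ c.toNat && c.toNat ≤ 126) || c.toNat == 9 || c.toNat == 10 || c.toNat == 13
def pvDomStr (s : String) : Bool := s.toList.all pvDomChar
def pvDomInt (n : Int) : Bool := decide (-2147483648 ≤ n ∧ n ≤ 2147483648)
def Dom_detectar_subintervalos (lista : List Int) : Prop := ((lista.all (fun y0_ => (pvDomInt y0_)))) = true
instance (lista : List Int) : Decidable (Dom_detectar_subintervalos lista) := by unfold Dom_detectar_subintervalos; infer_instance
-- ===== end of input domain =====

-- B detects maximal +5000 runs via the groupby key value-5000*index with two index pointers,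
-- collecting endpoint pairs and formatting them in a second pass (alternative structure, same cost).


-- ===== PORT A =====
-- shared formatting helper: f"[{a}, {b}]"
def pvFmt (a b : Int) : String := "[" ++ PySem.Int.toStr a ++ ", " ++ PySem.Int.toStr b ++ "]"

-- A's loop body over state (subintervalos, inicio, fim)
def pvStepA (s : List String × Int × Int) (valor : Int) : List String × Int × Int :=
  if valor = s.2.2 + 5000 then (s.1, s.2.1, valor)
  else (s.1 ++ [pvFmt s.2.1 s.2.2], valor, valor)

def detectar_subintervalos (lista : List Int) : List String :=
  match lista with
  | [] => []
  | x :: rest =>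
    let s := rest.foldl pvStepA ([], x, x)
    s.1 ++ [pvFmt s.2.1 s.2.2]

-- ===== PORT B =====
-- inner while loop: advance j while lista[j] - 5000*j == k
def pvInnerJ (lista : List Int) (k : Int) (j : Nat) : Nat :=
  if _h : j < lista.length ∧ lista.getD j 0 - 5000 * (j : Int) = k then
    pvInnerJ lista k (j + 1)
  else j
termination_by lista.length - j

theorem pvInnerJ_ge (lista : List Int) (k : Int) (j : Nat) : j ≤ pvInnerJ lista k j := by
  rw [pvInnerJ]
  split
  · exact Nat.le_trans (by omega) (pvInnerJ_ge lista k (j + 1))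
  · exact Nat.le_refl j
termination_by lista.length - j

-- outer while loop over i, collecting (first, last) endpoint pairs
def pvOuter (lista : List Int) (i : Nat) (grupos : List (Int × Int)) : List (Int × Int) :=
  if _h : i < lista.length then
    let k := lista.getD i 0 - 5000 * (i : Int)
    let j := pvInnerJ lista k (i + 1)
    pvOuter lista j (grupos ++ [(lista.getD i 0, lista.getD (j - 1) 0)])
  else grupos
termination_by lista.length - i
decreasing_by
  have := pvInnerJ_ge lista (lista.getD i 0 - 5000 * (i : Int)) (i + 1)
  omega

def detectar_subintervalos_alt (lista : List Int) : List String :=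
  (pvOuter lista 0 []).map (fun p => pvFmt p.1 p.2)

-- ===== PRECONDITION & SPEC =====
def Spec_detectar_subintervalos (lista : List Int) (out : List String) : Prop := out = detectar_subintervalos_alt lista
instance (lista : List Int) (out : List String) : Decidable (Spec_detectar_subintervalos lista out) := by unfold Spec_detectar_subintervalos; infer_instance

-- ===== CLAIM (what is proved, stated in full; the proofs are below) =====
def Claim_equal_detectar_subintervalos : Prop := ∀ (lista : List Int), Dom_detectar_subintervalos lista → Spec_detectar_subintervalos lista (detectar_subintervalos lista)

-- ===== LEMMAS AND PROOFS =====

-- reference recursion: one group at a time, state (inicio, fim)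
def pvGo (inicio fim : Int) : List Int → List String
  | [] => [pvFmt inicio fim]
  | v :: t => if v = fim + 5000 then pvGo inicio v t else pvFmt inicio fim :: pvGo v v t

theorem pvInnerJ_le (lista : List Int) (k : Int) (j : Nat) (h : j ≤ lista.length) :
    pvInnerJ lista k j ≤ lista.length := by
  rw [pvInnerJ]
  split
  · next hc => exact pvInnerJ_le lista k (j + 1) (by omega)
  · exact h
termination_by lista.length - j

theorem pvOuter_acc (lista : List Int) (i : Nat) (grupos : List (Int × Int)) :
    pvOuter lista i grupos = grupos ++ pvOuter lista i [] := by
  conv_lhs => rw [pvOuter]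
  conv_rhs => rw [pvOuter]
  split
  · next h =>
    rw [pvOuter_acc lista (pvInnerJ lista (lista.getD i 0 - 5000 * (i : Int)) (i + 1))
          (grupos ++ [(lista.getD i 0, lista.getD (pvInnerJ lista (lista.getD i 0 - 5000 * (i : Int)) (i + 1) - 1) 0)]),
        pvOuter_acc lista (pvInnerJ lista (lista.getD i 0 - 5000 * (i : Int)) (i + 1))
          ([] ++ [(lista.getD i 0, lista.getD (pvInnerJ lista (lista.getD i 0 - 5000 * (i : Int)) (i + 1) - 1) 0)])]
    simp
  · simp
termination_by lista.length - i
decreasing_by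
  all_goals
    have := pvInnerJ_ge lista (lista.getD i 0 - 5000 * (i : Int)) (i + 1)
    omega

-- A-side: the fold with accumulator equals pvGo
theorem foldA_go (rest : List Int) : ∀ (subs : List String) (inicio fim : Int),
    (let s := rest.foldl pvStepA (subs, inicio, fim); s.1 ++ [pvFmt s.2.1 s.2.2])
      = subs ++ pvGo inicio fim rest := by
  induction rest with
  | nil => intro subs inicio fim; simp [pvGo]
  | cons v t ih =>
    intro subs inicio fim
    simp only [List.foldl_cons, pvStepA, pvGo]
    by_cases h : v = fim + 5000
    · simp [h, ih]
    · simp [h, ih]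

-- B-side: pvGo equals the two-pointer scan, measured from index j (fim sits at index j-1)
theorem go_outer (lista : List Int) (m : Nat) : ∀ (j : Nat) (inicio fim : Int),
    m = lista.length - j → 1 ≤ j → j ≤ lista.length → fim = lista.getD (j - 1) 0 →
    pvGo inicio fim (lista.drop j)
      = pvFmt inicio (lista.getD (pvInnerJ lista (fim - 5000 * ((j : Int) - 1)) j - 1) 0)
          :: (pvOuter lista (pvInnerJ lista (fim - 5000 * ((j : Int) - 1)) j) []).map
              (fun p => pvFmt p.1 p.2) := by
  induction m with
  | zero =>
    intro j inicio fim hm hj1 hjn hfim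
    have hjeq : j = lista.length := by omega
    rw [pvInnerJ]
    have : ¬ (j < lista.length ∧ lista.getD j 0 - 5000 * (j : Int) = fim - 5000 * ((j : Int) - 1)) := by
      intro ⟨h1, _⟩; omega
    rw [dif_neg this]
    rw [pvOuter, dif_neg (by omega)]
    rw [hjeq, List.drop_length]
    simp [pvGo, hfim, hjeq]
  | succ m ih =>
    intro j inicio fim hm hj1 hjn hfim
    have hjlt : j < lista.length := by omega
    have hdrop : lista.drop j = lista.getD j 0 :: lista.drop (j + 1) := by
      rw [List.getD_eq_getElem _ _ hjlt]
      exact List.drop_eq_getElem_cons hjlt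
    set v := lista.getD j 0 with hv
    rw [hdrop]
    by_cases hc : v = fim + 5000
    · -- run continues: key matches at index j
      have hkey : v - 5000 * (j : Int) = fim - 5000 * ((j : Int) - 1) := by
        rw [hc]; ring
      rw [pvInnerJ, dif_pos ⟨hjlt, hkey⟩]
      have hgo : pvGo inicio fim (v :: lista.drop (j + 1)) = pvGo inicio v (lista.drop (j + 1)) := by
        simp [pvGo, hc]
      rw [hgo]
      have := ih (j + 1) inicio v (by omega) (by omega) (by omega) (by simp [hv])
      have hkey2 : v - 5000 * ((((j + 1 : Nat)) : Int) - 1) = fim - 5000 * ((j : Int) - 1) := by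
        push_cast; rw [hc]; ring
      rw [hkey2] at this
      exact this
    · -- run breaks at index j: inner loop stops, new group starts at j
      have hstop : ¬ (j < lista.length ∧ lista.getD j 0 - 5000 * (j : Int) = fim - 5000 * ((j : Int) - 1)) := by
        intro ⟨_, h2⟩
        apply hc
        have : lista.getD j 0 = fim + 5000 * (j : Int) - 5000 * ((j : Int) - 1) := by omega
        rw [hv, this]; ring
      rw [pvInnerJ, dif_neg hstop]
      have hgo : pvGo inicio fim (v :: lista.drop (j + 1)) = pvFmt inicio fim :: pvGo v v (lista.drop (j + 1)) := by
        simp [pvGo, hc]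
      rw [hgo]
      rw [pvOuter, dif_pos hjlt]
      rw [pvOuter_acc]
      have hih := ih (j + 1) v v (by omega) (by omega) (by omega) (by simp [hv])
      have hkey3 : v - 5000 * ((((j + 1 : Nat)) : Int) - 1) = lista.getD j 0 - 5000 * (j : Int) := by
        push_cast; rw [hv]; ring
      rw [hkey3] at hih
      rw [hih]
      simp [hfim, hv]

-- ===== VERDICT (by name: the statement is the Claim_ definition above) =====
theorem detectar_subintervalos_spec : Claim_equal_detectar_subintervalos := by
  intro lista _
  unfold Spec_detectar_subintervalos detectar_subintervalos detectar_subintervalos_alt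
  match lista with
  | [] => rw [pvOuter, dif_neg (by simp)]; rfl
  | x :: rest =>
    simp only
    rw [foldA_go rest [] x x, List.nil_append]
    rw [pvOuter, dif_pos (by simp)]
    rw [pvOuter_acc]
    have h := go_outer (x :: rest) ((x :: rest).length - 1) 1 x x rfl (by omega) (by simp) (by simp)
    have hkey : (x : Int) - 5000 * ((1 : Nat) - 1 : Int) = (x :: rest).getD 0 0 - 5000 * ((0 : Nat) : Int) := by
      push_cast; simp
    rw [hkey] at h
    simp only [List.drop_one, List.tail_cons] at h
    rw [h]
    simp
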